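-- pv_equiv track=rewrite | github.com/doodlum/SkyUI-Community | tools/xml_fps_patcher.py | build_tag_str
-- ===== SOURCE A (Python) =====
-- def build_tag_str(t_type, attrs, children_str=""):
--     pref_order = ['characterId', 'clipDepth', 'depth', 'forceWriteAsLong', 'name', 'placeFlagHasCharacter', 'placeFlagHasClipActions', 'placeFlagHasClipDepth', 'placeFlagHasColorTransform', 'placeFlagHasMatrix', 'placeFlagHasName', 'placeFlagHasRatio', 'placeFlagMove', 'ratio']
--     filtered = {k: v for k, v in attrs.items() if k not in ['type', 'reserved']}
--     attr_parts = []
--     for k in pref_order: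
--         if k in filtered: attr_parts.append(f'{k}="{filtered[k]}"')
--     for k in sorted(filtered.keys()):
--         if k not in pref_order: attr_parts.append(f'{k}="{filtered[k]}"')
--     attr_str = " ".join(attr_parts)
--     if children_str: return f'        <item type="{t_type}" {attr_str}>\n{children_str}        </item>'
--     else: return f'        <item type="{t_type}" {attr_str}/>'
-- ===== SOURCE B (Python) =====
-- PREF = {'characterId', 'clipDepth', 'depth', 'forceWriteAsLong', 'name',
--         'placeFlagHasCharacter', 'placeFlagHasClipActions', 'placeFlagHasClipDepth',
--         'placeFlagHasColorTransform', 'placeFlagHasMatrix', 'placeFlagHasName',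
--         'placeFlagHasRatio', 'placeFlagMove', 'ratio'}
--
--
-- def build_tag_str(t_type, attrs, children_str=""):
--     # The preferred-order list is alphabetically sorted, so the output order is:
--     # preferred keys sorted, then the remaining keys sorted.
--     items = {k: v for k, v in attrs.items() if k not in ('type', 'reserved')}
--     keys = sorted(k for k in items if k in PREF) + sorted(k for k in items if k not in PREF)
--     attr_str = " ".join('{}="{}"'.format(k, items[k]) for k in keys)
--     core = '        <item type="{}" {}'.format(t_type, attr_str)
--     if children_str:
--         return core + '>\n' + children_str + '        </item>'
--     return core + '/>'
-- ===== Notes on version B (the rewrite author's own statement) =====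
-- stated objective: simpler
-- what changed: B drops A's scan of the 14-entry preferred-order list entirely: since that list is alphabetically sorted, B just partitions the filtered keys into preferred/other with a set and concatenates the two sorted groups.
import Mathlib
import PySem

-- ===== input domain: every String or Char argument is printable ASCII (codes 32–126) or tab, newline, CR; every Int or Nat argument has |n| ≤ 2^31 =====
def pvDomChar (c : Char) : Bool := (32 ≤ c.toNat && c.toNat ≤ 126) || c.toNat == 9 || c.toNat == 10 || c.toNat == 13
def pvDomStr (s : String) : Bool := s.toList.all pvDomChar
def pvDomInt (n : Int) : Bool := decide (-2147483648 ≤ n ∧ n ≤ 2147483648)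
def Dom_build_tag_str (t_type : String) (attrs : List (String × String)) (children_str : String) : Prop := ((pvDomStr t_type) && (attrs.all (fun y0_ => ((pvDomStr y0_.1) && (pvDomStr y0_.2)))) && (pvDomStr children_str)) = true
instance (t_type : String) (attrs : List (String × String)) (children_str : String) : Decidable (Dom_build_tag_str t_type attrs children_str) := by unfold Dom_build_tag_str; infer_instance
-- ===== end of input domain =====

-- B replaces A's scan of the preferred-order list by a partition of the filtered keys
-- into preferred/other (the preferred list is alphabetically sorted), two sorts, and a concatenation.
-- Objective: simpler (same asymptotic cost).

-- ===== PORT A =====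
def pvPrefOrder : List String :=
  ["characterId", "clipDepth", "depth", "forceWriteAsLong", "name", "placeFlagHasCharacter",
   "placeFlagHasClipActions", "placeFlagHasClipDepth", "placeFlagHasColorTransform",
   "placeFlagHasMatrix", "placeFlagHasName", "placeFlagHasRatio", "placeFlagMove", "ratio"]

def build_tag_str (t_type : String) (attrs : List (String × String)) (children_str : String) : String :=
  let filtered : PySem.Dict String String :=
    attrs.foldl (fun d p => if p.1 ∉ ["type", "reserved"] then d.insert p.1 p.2 else d) PySem.Dict.empty
  let attr_parts : List String :=
    pvPrefOrder.foldl (fun acc k =>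
      if filtered.contains k then acc ++ [k ++ "=\"" ++ filtered.getD k "" ++ "\""] else acc) []
  let attr_parts2 : List String :=
    (PySem.List.sorted filtered.keys (fun k => k) false).foldl (fun acc k =>
      if k ∉ pvPrefOrder then acc ++ [k ++ "=\"" ++ filtered.getD k "" ++ "\""] else acc) attr_parts
  let attr_str := PySem.Str.join " " attr_parts2
  if children_str ≠ "" then
    "        <item type=\"" ++ t_type ++ "\" " ++ attr_str ++ ">\n" ++ children_str ++ "        </item>"
  else
    "        <item type=\"" ++ t_type ++ "\" " ++ attr_str ++ "/>"

-- ===== PORT B =====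
-- the preferred-attribute SET of Source B (a Python set literal of distinct strings)
def pvPrefSet : List String :=
  ["characterId", "clipDepth", "depth", "forceWriteAsLong", "name", "placeFlagHasCharacter",
   "placeFlagHasClipActions", "placeFlagHasClipDepth", "placeFlagHasColorTransform",
   "placeFlagHasMatrix", "placeFlagHasName", "placeFlagHasRatio", "placeFlagMove", "ratio"]

def build_tag_str_alt (t_type : String) (attrs : List (String × String)) (children_str : String) : String :=
  let items : PySem.Dict String String :=
    PySem.Dict.ofList (attrs.filter (fun p => decide (p.1 ∉ ["type", "reserved"])))
  let keys : List String :=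
    PySem.List.sorted (items.keys.filter (fun k => decide (k ∈ pvPrefSet))) (fun k => k) false
      ++ PySem.List.sorted (items.keys.filter (fun k => decide (k ∉ pvPrefSet))) (fun k => k) false
  let attr_str := PySem.Str.join " " (keys.map (fun k => k ++ "=\"" ++ items.getD k "" ++ "\""))
  let core := "        <item type=\"" ++ t_type ++ "\" " ++ attr_str
  if children_str ≠ "" then core ++ ">\n" ++ children_str ++ "        </item>"
  else core ++ "/>"

-- ===== PRECONDITION & SPEC =====
def Spec_build_tag_str (t_type : String) (attrs : List (String × String)) (children_str : String) (out : String) : Prop := out = build_tag_str_alt t_type attrs children_str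
instance (t_type : String) (attrs : List (String × String)) (children_str : String) (out : String) : Decidable (Spec_build_tag_str t_type attrs children_str out) := by unfold Spec_build_tag_str; infer_instance

-- ===== CLAIM (what is proved, stated in full; the proofs are below) =====
def Claim_equal_build_tag_str : Prop := ∀ (t_type : String) (attrs : List (String × String)) (children_str : String), Dom_build_tag_str t_type attrs children_str → Spec_build_tag_str t_type attrs children_str (build_tag_str t_type attrs children_str)

-- ===== LEMMAS AND PROOFS =====

-- a foldl that conditionally appends is an append of a filtered map
theorem pv_foldl_append_ite {α β : Type} (p : α → Prop) [DecidablePred p] (f : α → β) :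
    ∀ (l : List α) (acc : List β),
      l.foldl (fun acc x => if p x then acc ++ [f x] else acc) acc
        = acc ++ (l.filter (fun x => decide (p x))).map f := by
  intro l
  induction l with
  | nil => intro acc; simp
  | cons x t ih =>
    intro acc
    by_cases h : p x <;> simp [h, ih]

-- a foldl that conditionally inserts equals inserting the filtered list
theorem pv_foldl_insert_ite {κ ν : Type} [BEq κ] (p : κ × ν → Prop) [DecidablePred p] :
    ∀ (l : List (κ × ν)) (d : PySem.Dict κ ν),
      l.foldl (fun d q => if p q then d.insert q.1 q.2 else d) d
        = (l.filter (fun q => decide (p q))).foldl (fun d q => d.insert q.1 q.2) d := by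
  intro l
  induction l with
  | nil => intro d; rfl
  | cons q t ih =>
    intro d
    by_cases h : p q <;> simp [h, ih]

theorem pvPrefOrder_pairwise : pvPrefOrder.Pairwise (fun a b => a < b) := by
  simp only [pvPrefOrder, List.pairwise_cons, List.mem_cons, List.not_mem_nil,
    String.lt_iff_toList_lt, forall_eq_or_imp, forall_eq, or_false, false_implies,
    and_true, List.Pairwise.nil, forall_const]
  and_intros <;> decide

theorem pvPrefOrder_nodup : pvPrefOrder.Nodup :=
  pvPrefOrder_pairwise.imp (fun h => ne_of_lt h)

-- A's scan of the (alphabetically sorted) preferred list over the present keys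
-- IS the sorted list of present preferred keys.
theorem pv_keys_part1 (K : List String) (hK : K.Nodup) :
    PySem.List.sorted (K.filter (fun k => decide (k ∈ pvPrefOrder))) (fun k => k) false
      = pvPrefOrder.filter (fun k => decide (k ∈ K)) := by
  apply PySem.List.sorted_eq_of_perm_of_pairwise_lt
  · rw [List.perm_ext_iff_of_nodup (pvPrefOrder_nodup.filter _) (hK.filter _)]
    intro a
    simp only [List.mem_filter, decide_eq_true_eq]
    exact and_comm
  · exact pvPrefOrder_pairwise.filter _

-- filtering a sorted list is sorting the filtered list
theorem pv_keys_part2 (K : List String) (hK : K.Nodup) (p : String → Prop) [DecidablePred p] :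
    PySem.List.sorted (K.filter (fun k => decide (p k))) (fun k => k) false
      = (PySem.List.sorted K (fun k => k) false).filter (fun k => decide (p k)) := by
  apply PySem.List.sorted_eq_of_perm_of_pairwise_lt
  · exact (PySem.List.sorted_perm K _ false).filter _
  · have h1 : (PySem.List.sorted K (fun k => k) false).Pairwise (fun a b => a ≤ b) :=
      PySem.List.sorted_pairwise K (fun k => k)
    have h2 : (PySem.List.sorted K (fun k => k) false).Nodup :=
      ((PySem.List.sorted_perm K (fun k => k) false).nodup_iff).mpr hK
    exact ((h1.and h2).imp (fun h => lt_of_le_of_ne h.1 h.2)).filter _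

-- ===== VERDICT (by name: the statement is the Claim_ definition above) =====
theorem build_tag_str_spec : Claim_equal_build_tag_str := by
  intro t_type attrs children_str _
  show build_tag_str t_type attrs children_str = build_tag_str_alt t_type attrs children_str
  unfold build_tag_str build_tag_str_alt
  have hd : attrs.foldl (fun d p => if p.1 ∉ ["type", "reserved"] then d.insert p.1 p.2 else d)
        PySem.Dict.empty
      = PySem.Dict.ofList (attrs.filter (fun p => decide (p.1 ∉ ["type", "reserved"]))) := by
    rw [pv_foldl_insert_ite]; rfl
  rw [hd]
  set D := PySem.Dict.ofList (attrs.filter (fun p => decide (p.1 ∉ ["type", "reserved"]))) with hD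
  have hK : D.keys.Nodup := PySem.Dict.nodup_keys_ofList _
  have hset : pvPrefSet = pvPrefOrder := rfl
  have hcontains : (fun k => decide (D.contains k = true)) = (fun k => decide (k ∈ D.keys)) := by
    funext k
    simp [PySem.Dict.contains_iff_mem_keys]
  have hparts :
      ((pvPrefOrder.filter (fun k => decide (D.contains k = true))).map
          (fun k => k ++ "=\"" ++ D.getD k "" ++ "\"")
        ++ ((PySem.List.sorted D.keys (fun k => k) false).filter
              (fun k => decide (k ∉ pvPrefOrder))).map
            (fun k => k ++ "=\"" ++ D.getD k "" ++ "\""))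
      = (PySem.List.sorted (D.keys.filter (fun k => decide (k ∈ pvPrefSet))) (fun k => k) false
          ++ PySem.List.sorted (D.keys.filter (fun k => decide (k ∉ pvPrefSet))) (fun k => k) false).map
          (fun k => k ++ "=\"" ++ D.getD k "" ++ "\"") := by
    rw [List.map_append, hcontains, hset, pv_keys_part1 D.keys hK,
        pv_keys_part2 D.keys hK (fun k => k ∉ pvPrefOrder)]
  simp only [pv_foldl_append_ite, List.nil_append]
  rw [hparts]
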